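-- pv_equiv track=rewrite | github.com/rolfhm/loki | loki/expression/tests/test_expression.py | convert_to_case
-- ===== SOURCE A (Python) =====
-- def convert_to_case(_str, mode='upper'):
--     if mode == 'upper':
--         return _str.upper()
--     if mode == 'lower':
--         return _str.lower()
--     if mode == 'random':
--         # this is obviously not random, but fulfils its purpose ...
--         result = ''
--         for i, char in enumerate(_str):
--             result += char.upper() if i%2==0 and i<3 else char.lower()
--         return result
--     return convert_to_case(_str)
-- ===== SOURCE B (Python) =====
-- def convert_to_case(_str, mode='upper'):
--     if mode == 'lower':
--         return _str.lower()
--     if mode == 'random':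
--         # fixed "pseudo-random" pattern: only positions 0 and 2 upper, rest lower
--         s = _str.lower()
--         return s[:1].upper() + s[1:2] + s[2:3].upper() + s[3:]
--     return _str.upper()
-- ===== Notes on version B (the rewrite author's own statement) =====
-- stated objective: simpler
-- what changed: The random-mode indexed loop with its parity-and-position test is replaced by a closed-form slice transform (lowercase the whole string, then uppercase the one-character slices at positions 0 and 2), and the default branch returns the uppercased string directly instead of recursing.
import Mathlib
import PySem

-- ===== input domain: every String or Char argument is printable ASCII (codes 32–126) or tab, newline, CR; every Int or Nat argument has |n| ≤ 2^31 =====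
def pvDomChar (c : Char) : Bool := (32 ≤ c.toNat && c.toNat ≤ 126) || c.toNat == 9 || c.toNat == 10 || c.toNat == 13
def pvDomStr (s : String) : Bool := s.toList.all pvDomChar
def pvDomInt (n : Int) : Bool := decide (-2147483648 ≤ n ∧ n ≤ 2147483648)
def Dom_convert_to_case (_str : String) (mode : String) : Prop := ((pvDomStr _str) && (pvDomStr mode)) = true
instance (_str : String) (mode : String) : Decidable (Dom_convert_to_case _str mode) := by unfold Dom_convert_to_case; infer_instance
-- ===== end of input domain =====

-- B replaces the 'random' mode's indexed loop by a closed-form slice transform and the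
-- default branch's recursion by a direct _str.upper(); return value only, no mutation.

-- ===== PORT A =====
def convert_to_case (_str : String) (mode : String) : String :=
  if h : mode = "upper" then PySem.Str.upper _str
  else if mode = "lower" then PySem.Str.lower _str
  else if mode = "random" then
    String.ofList ((PySem.List.enumerate _str.toList 0).foldl
      (fun result p =>
        result ++ (if PySem.Int.mod p.1 2 = 0 ∧ p.1 < 3
                   then [PySem.Chars.upperChar p.2] else [PySem.Chars.lowerChar p.2])) [])
  else convert_to_case _str "upper"
termination_by (if mode = "upper" then 0 else 1)
decreasing_by simp [h]

-- ===== PORT B =====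
def convert_to_case_alt (_str : String) (mode : String) : String :=
  if mode = "lower" then PySem.Str.lower _str
  else if mode = "random" then
    let s := PySem.Chars.lower _str.toList
    String.ofList (PySem.Chars.upper (PySem.List.slice s none (some 1)) ++
      PySem.List.slice s (some 1) (some 2) ++
      PySem.Chars.upper (PySem.List.slice s (some 2) (some 3)) ++
      PySem.List.slice s (some 3) none)
  else PySem.Str.upper _str

-- ===== PRECONDITION & SPEC =====
def Spec_convert_to_case (_str : String) (mode : String) (out : String) : Prop := out = convert_to_case_alt _str mode
instance (_str : String) (mode : String) (out : String) : Decidable (Spec_convert_to_case _str mode out) := by unfold Spec_convert_to_case; infer_instance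

-- ===== CLAIM (what is proved, stated in full; the proofs are below) =====
def Claim_equal_convert_to_case : Prop := ∀ (_str : String) (mode : String), Dom_convert_to_case _str mode → Spec_convert_to_case _str mode (convert_to_case _str mode)

-- ===== LEMMAS AND PROOFS =====

theorem char_le_iff (a b : Char) : a ≤ b ↔ a.toNat ≤ b.toNat := ge_iff_le

theorem lowerChar_eq (c : Char) :
    PySem.Chars.lowerChar c = if 65 ≤ c.toNat ∧ c.toNat ≤ 90 then Char.ofNat (c.toNat + 32) else c := by
  simp only [PySem.Chars.lowerChar, PySem.Chars.isupper, Bool.and_eq_true, decide_eq_true_eq, char_le_iff]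
  have hA : 'A'.toNat = 65 := by decide
  have hZ : 'Z'.toNat = 90 := by decide
  simp only [hA, hZ]

theorem upperChar_eq (c : Char) :
    PySem.Chars.upperChar c = if 97 ≤ c.toNat ∧ c.toNat ≤ 122 then Char.ofNat (c.toNat - 32) else c := by
  simp only [PySem.Chars.upperChar, PySem.Chars.islower, Bool.and_eq_true, decide_eq_true_eq, char_le_iff]
  have ha : 'a'.toNat = 97 := by decide
  have hz : 'z'.toNat = 122 := by decide
  simp only [ha, hz]

theorem upperChar_lowerChar (c : Char) :
    PySem.Chars.upperChar (PySem.Chars.lowerChar c) = PySem.Chars.upperChar c := by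
  rw [lowerChar_eq, upperChar_eq, upperChar_eq]
  by_cases h : 65 ≤ c.toNat ∧ c.toNat ≤ 90
  · have ht : (Char.ofNat (c.toNat + 32)).toNat = c.toNat + 32 := by
      rw [Char.toNat_ofNat, if_pos (Or.inl (by omega))]
    rw [if_pos h, if_pos (by rw [ht]; omega), ht]
    have h2 : c.toNat + 32 - 32 = c.toNat := by omega
    rw [h2, Char.ofNat_toNat, if_neg (by omega)]
  · rw [if_neg h]

-- the loop body of A's 'random' branch
def pvRandStep (result : List Char) (p : Int × Char) : List Char :=
  result ++ (if PySem.Int.mod p.1 2 = 0 ∧ p.1 < 3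
             then [PySem.Chars.upperChar p.2] else [PySem.Chars.lowerChar p.2])

theorem rand_tail (rest : List Char) : ∀ (s : Int), 3 ≤ s → ∀ (acc : List Char),
    (PySem.List.enumerate rest s).foldl pvRandStep acc = acc ++ rest.map PySem.Chars.lowerChar := by
  induction rest with
  | nil => intro s hs acc; simp [PySem.List.enumerate]
  | cons x xs ih =>
    intro s hs acc
    rw [PySem.List.enumerate_cons, List.foldl_cons, ih (s + 1) (by omega)]
    simp only [pvRandStep]
    rw [if_neg (fun h => absurd h.2 (by omega))]
    simp

theorem rand_core (cs : List Char) :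
    (PySem.List.enumerate cs 0).foldl pvRandStep []
    = PySem.Chars.upper (PySem.List.slice (PySem.Chars.lower cs) none (some 1)) ++
      PySem.List.slice (PySem.Chars.lower cs) (some 1) (some 2) ++
      PySem.Chars.upper (PySem.List.slice (PySem.Chars.lower cs) (some 2) (some 3)) ++
      PySem.List.slice (PySem.Chars.lower cs) (some 3) none := by
  match cs with
  | [] => simp [PySem.List.enumerate, PySem.Chars.lower, PySem.Chars.upper, PySem.List.slice]
  | [a] =>
    simp [PySem.List.enumerate, PySem.Chars.lower, PySem.Chars.upper, PySem.List.slice,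
      PySem.List.clampIdx, pvRandStep, upperChar_lowerChar]
  | [a, b] =>
    simp [PySem.List.enumerate, PySem.Chars.lower, PySem.Chars.upper, PySem.List.slice,
      PySem.List.clampIdx, pvRandStep, upperChar_lowerChar]
  | a :: b :: c :: rest =>
    have h3 : (PySem.List.enumerate (a :: b :: c :: rest) 0).foldl pvRandStep []
        = [PySem.Chars.upperChar a, PySem.Chars.lowerChar b, PySem.Chars.upperChar c] ++
            rest.map PySem.Chars.lowerChar := by
      rw [PySem.List.enumerate_cons, PySem.List.enumerate_cons, PySem.List.enumerate_cons]
      norm_num [List.foldl_cons, pvRandStep]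
      rw [rand_tail rest 3 (by omega)]
      simp
    rw [h3]
    simp [PySem.Chars.lower, PySem.Chars.upper, PySem.List.slice, PySem.List.clampIdx,
      upperChar_lowerChar]

-- ===== VERDICT (by name: the statement is the Claim_ definition above) =====
theorem convert_to_case_spec : Claim_equal_convert_to_case := by
  intro _str mode _
  unfold Spec_convert_to_case convert_to_case convert_to_case_alt
  by_cases hu : mode = "upper"
  · simp [hu]
  · by_cases hl : mode = "lower"
    · simp [hl]
    · by_cases hr : mode = "random"
      · rw [dif_neg hu, if_neg hl, if_pos hr, if_neg hl, if_pos hr]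
        have hb : ((PySem.List.enumerate _str.toList 0).foldl
            (fun result p =>
              result ++ (if PySem.Int.mod p.1 2 = 0 ∧ p.1 < 3
                         then [PySem.Chars.upperChar p.2] else [PySem.Chars.lowerChar p.2])) [])
            = (PySem.List.enumerate _str.toList 0).foldl pvRandStep [] := rfl
        rw [hb, rand_core]
      · rw [dif_neg hu, if_neg hl, if_neg hr, if_neg hl, if_neg hr]
        unfold convert_to_case
        simp
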